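-- pv_equiv track=rewrite | github.com/yokoyama-gif/arch-to-3d | claud/arch-to-3d/backend/app/services/drawing_import.py | _read_pairs
-- ===== SOURCE A (Python) =====
-- class DrawingImportError(Exception):
--     pass
--
-- def _read_pairs(text: str) -> list[tuple[str, str]]:
--     lines = [line.rstrip("\r") for line in text.split("\n") if line is not None]
--     if len(lines) < 2:
--         raise DrawingImportError("DXF の内容が不正です。")
--     if len(lines) % 2 == 1:
--         lines = lines[:-1]
--     return [
--         (lines[index].strip(), lines[index + 1].strip())
--         for index in range(0, len(lines), 2)
--     ]
-- ===== SOURCE B (Python) =====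
-- class DrawingImportError(Exception):
--     pass
--
--
-- def _read_pairs(text: str) -> list[tuple[str, str]]:
--     # Scan the raw text with find("\n") and slice each pair out directly,
--     # without ever building a list of lines.
--     if "\n" not in text:
--         raise DrawingImportError("DXF の内容が不正です。")
--     pairs = []
--     pos = 0
--     while True:
--         i = text.find("\n", pos)
--         if i == -1:
--             break  # unmatched final line: dropped
--         j = text.find("\n", i + 1)
--         if j == -1:
--             pairs.append((text[pos:i].strip(), text[i + 1:].strip()))
--             break
--         pairs.append((text[pos:i].strip(), text[i + 1:j].strip()))
--         pos = j + 1
--     return pairs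
-- ===== Notes on version B (the rewrite author's own statement) =====
-- stated objective: alternative
-- what changed: B never builds a line list: it scans the raw text with find('\n') and slices each pair of lines out directly (the rstrip('\r') step disappears because strip() already removes '\r'), instead of A's split-into-lines, rstrip each, then range(0,n,2) index pairing with an explicit drop-last-if-odd trim.
import Mathlib
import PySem

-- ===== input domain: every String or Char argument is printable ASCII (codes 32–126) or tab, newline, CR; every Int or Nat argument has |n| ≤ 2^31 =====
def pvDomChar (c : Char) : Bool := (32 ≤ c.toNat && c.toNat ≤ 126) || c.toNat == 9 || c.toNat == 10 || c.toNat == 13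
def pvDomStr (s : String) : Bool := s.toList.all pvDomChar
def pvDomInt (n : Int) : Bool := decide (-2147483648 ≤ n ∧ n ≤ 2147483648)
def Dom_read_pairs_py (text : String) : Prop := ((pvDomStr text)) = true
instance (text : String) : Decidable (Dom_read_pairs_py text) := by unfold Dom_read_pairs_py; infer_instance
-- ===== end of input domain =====

-- B scans the raw text for '\n' and slices each pair of lines out directly, never building a
-- line list (and drops A's redundant rstrip('\r'), since strip() removes '\r' anyway);
-- objective: alternative decomposition, same cost.

-- ===== PORT A =====
-- line.rstrip("\r") on code points: exact, since the stripped character set is the single char '\r'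
def pvRstripCR (cs : List Char) : List Char := (cs.reverse.dropWhile (· == '\r')).reverse

def read_pairs_py (text : String) : List (String × String) :=
  -- 'if line is not None' in A's comprehension is always true and drops out
  let lines := ((PySem.Str.split? text "\n").getD []).map (fun l => String.ofList (pvRstripCR l.toList))
  if lines.length < 2 then []  -- Python raises DrawingImportError here; excluded by Pre_
  else
    let lines := if lines.length % 2 == 1 then PySem.List.slice lines none (some (-1)) else lines
    (PySem.List.pyRange 0 (lines.length) 2).map
      (fun index => (PySem.Str.strip (PySem.List.pyGetD lines index ""),
                     PySem.Str.strip (PySem.List.pyGetD lines (index + 1) "")))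

-- ===== PORT B =====
-- The loop body 'i = text.find("\n", pos); j = text.find("\n", i+1); slice; pos = j+1' on the
-- running suffix text[pos:]: find + slice-at-the-found-index is exactly splitting the suffix at
-- its first '\n' (List.span on code points); find == -1 is the empty span remainder, and in the
-- j == -1 branch Python's text[i+1:] is the whole tail after the first '\n'.
def pvScan (cs : List Char) : List (String × String) :=
  match h1 : cs.span (· ≠ '\n') with
  | (_, []) => []  -- i == -1: unmatched final line, dropped
  | (first, c :: tail) =>
    match h2 : tail.span (· ≠ '\n') with
    | (_, []) =>  -- j == -1: last pair, text[i+1:] = tail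
      [(String.ofList (PySem.Chars.strip first), String.ofList (PySem.Chars.strip tail))]
    | (second, d :: tail2) =>
      (String.ofList (PySem.Chars.strip first), String.ofList (PySem.Chars.strip second)) :: pvScan tail2
termination_by cs.length
decreasing_by
  have e1 : cs.dropWhile (· ≠ '\n') = c :: tail := by
    have := congrArg Prod.snd h1; simpa [List.span_eq_takeWhile_dropWhile] using this
  have e2 : tail.dropWhile (· ≠ '\n') = d :: tail2 := by
    have := congrArg Prod.snd h2; simpa [List.span_eq_takeWhile_dropWhile] using this
  have l1 : (cs.dropWhile (· ≠ '\n')).length ≤ cs.length := List.length_dropWhile_le _ _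
  have l2 : (tail.dropWhile (· ≠ '\n')).length ≤ tail.length := List.length_dropWhile_le _ _
  rw [e1] at l1; rw [e2] at l2
  simp at l1 l2; omega

def read_pairs_py_alt (text : String) : List (String × String) :=
  if PySem.Str.isIn "\n" text = false then []  -- Python raises DrawingImportError here; excluded by Pre_
  else pvScan text.toList

-- ===== PRECONDITION & SPEC =====
-- Pre_ excludes exactly the inputs where A (and B) raise DrawingImportError: text without any
-- newline splits into a single line, so len(lines) < 2.
def Pre_read_pairs_py (text : String) : Prop := PySem.Str.isIn "\n" text = true
instance (text : String) : Decidable (Pre_read_pairs_py text) := by unfold Pre_read_pairs_py; infer_instance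
def pvWitness_read_pairs_py : String := "10\nSECTION\n0\nEOF"
def Spec_read_pairs_py (text : String) (out : List (String × String)) : Prop := out = read_pairs_py_alt text
instance (text : String) (out : List (String × String)) : Decidable (Spec_read_pairs_py text out) := by unfold Spec_read_pairs_py; infer_instance

-- ===== CLAIM (what is proved, stated in full; the proofs are below) =====
def Claim_equal_read_pairs_py : Prop := ∀ (text : String), Dom_read_pairs_py text → Pre_read_pairs_py text → Spec_read_pairs_py text (read_pairs_py text)

-- ===== LEMMAS AND PROOFS =====

-- proof-side reference splitter: split a char list at each '\n' (same span shape as pvScan)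
def pvSplit (cs : List Char) : List (List Char) :=
  match h : cs.span (· ≠ '\n') with
  | (_, []) => [cs]
  | (_, c :: tail) => cs.takeWhile (· ≠ '\n') :: pvSplit tail
termination_by cs.length
decreasing_by
  have e1 : cs.dropWhile (· ≠ '\n') = c :: tail := by
    have := congrArg Prod.snd h; simpa [List.span_eq_takeWhile_dropWhile] using this
  have l1 : (cs.dropWhile (· ≠ '\n')).length ≤ cs.length := List.length_dropWhile_le _ _
  rw [e1] at l1; simp at l1; omega

-- A's two-at-a-time pairing of the split lines (the shape A's comprehension reduces to)
def pvPairUp : List String → List (String × String)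
  | a :: b :: rest => (PySem.Str.strip a, PySem.Str.strip b) :: pvPairUp rest
  | _ => []

theorem pvSplit_eq (cs : List Char) :
    pvSplit cs = (match cs.dropWhile (· ≠ '\n') with
      | [] => [cs]
      | _ :: tail => cs.takeWhile (· ≠ '\n') :: pvSplit tail) := by
  rw [pvSplit]
  split
  case _ fst h =>
    have hd : cs.dropWhile (· ≠ '\n') = [] := by
      have := congrArg Prod.snd h; simpa [List.span_eq_takeWhile_dropWhile] using this
    simp only [ne_eq, decide_not] at hd ⊢
    simp [hd]
  case _ fst c tail h =>
    have hd : cs.dropWhile (· ≠ '\n') = c :: tail := by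
      have := congrArg Prod.snd h; simpa [List.span_eq_takeWhile_dropWhile] using this
    simp only [ne_eq, decide_not] at hd ⊢
    simp [hd]

theorem pvSplit_ne_nil (cs : List Char) : pvSplit cs ≠ [] := by
  rw [pvSplit_eq]; rcases hd : cs.dropWhile (· ≠ '\n') <;> simp [hd]

theorem pvHeadI_tail (l : List (List Char)) (h : l ≠ []) : l.headI :: l.tail = l := by
  cases l with
  | nil => exact absurd rfl h
  | cons a t => rfl

theorem pvSplit_nil : pvSplit [] = [[]] := by rw [pvSplit_eq]; rfl

theorem pvSplit_nl (rest : List Char) : pvSplit ('\n'::rest) = [] :: pvSplit rest := by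
  rw [pvSplit_eq ('\n'::rest)]
  simp only [List.dropWhile_cons, List.takeWhile_cons, ne_eq, decide_not]
  simp

theorem pvSplit_cons (c : Char) (hc : c ≠ '\n') (rest : List Char) :
    pvSplit (c::rest) = (c :: (pvSplit rest).headI) :: (pvSplit rest).tail := by
  rw [pvSplit_eq (c::rest), pvSplit_eq rest]
  simp only [List.dropWhile_cons, List.takeWhile_cons, ne_eq, decide_not, hc, decide_false,
    Bool.not_false, if_true]
  rcases hd : rest.dropWhile (· ≠ '\n') with _ | ⟨d, tail⟩
  · have ht : rest.takeWhile (· ≠ '\n') = rest := by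
      have := List.takeWhile_append_dropWhile (p := fun x => decide (x ≠ '\n')) (l := rest)
      rw [hd] at this; simpa using this
    simp only [ne_eq, decide_not] at hd ht
    simp [hd, ht]
  · simp only [ne_eq, decide_not] at hd
    simp [hd]

-- PySem's fuel-based splitOn on the single-char separator '\n' computes pvSplit
theorem pvGo_eq (l : List Char) : ∀ (fuel : Nat) (cur : List Char) (acc : List (List Char)),
    l.length < fuel →
    PySem.Chars.splitOn.go ['\n'] fuel l cur acc
      = acc.reverse ++ ((cur.reverse ++ (pvSplit l).headI) :: (pvSplit l).tail) := by
  induction l with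
  | nil =>
    intro fuel cur acc hf
    match fuel, hf with
    | f + 1, _ =>
      simp only [PySem.Chars.splitOn.go, pvSplit_nil]
      simp
  | cons c rest ih =>
    intro fuel cur acc hf
    match fuel, hf with
    | f + 1, hf =>
      by_cases hc : c = '\n'
      · subst hc
        have step : PySem.Chars.splitOn.go ['\n'] (f+1) ('\n'::rest) cur acc
            = PySem.Chars.splitOn.go ['\n'] f rest [] (cur.reverse :: acc) := by
          simp only [PySem.Chars.splitOn.go]
          norm_num [List.isPrefixOf]
        rw [step, ih f [] (cur.reverse :: acc) (by simpa using Nat.lt_of_succ_lt_succ hf)]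
        rw [pvSplit_nl]
        simp [pvHeadI_tail _ (pvSplit_ne_nil rest)]
      · have step : PySem.Chars.splitOn.go ['\n'] (f+1) (c::rest) cur acc
            = PySem.Chars.splitOn.go ['\n'] f rest (c :: cur) acc := by
          simp only [PySem.Chars.splitOn.go]
          simp [List.isPrefixOf, Ne.symm hc]
        rw [step, ih f (c :: cur) acc (by simpa using Nat.lt_of_succ_lt_succ hf)]
        rw [pvSplit_cons c hc]
        simp

theorem pvSplitOn_eq (cs : List Char) : PySem.Chars.splitOn cs ['\n'] = pvSplit cs := by
  rw [PySem.Chars.splitOn, pvGo_eq cs (cs.length + 1) [] [] (by omega)]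
  simpa using pvHeadI_tail _ (pvSplit_ne_nil cs)

-- '\r' is whitespace, so a leading '\r'-drop before a whitespace-drop is absorbed
theorem pvDropSp_dropCr (x : List Char) :
    (x.dropWhile (· == '\r')).dropWhile PySem.Chars.isspace = x.dropWhile PySem.Chars.isspace := by
  induction x with
  | nil => rfl
  | cons a t ih =>
    by_cases ha : a = '\r'
    · subst ha
      simpa [List.dropWhile_cons, (by decide : PySem.Chars.isspace '\r' = true)] using ih
    · simp [List.dropWhile_cons, ha]

-- cons equation for pvRstripCR
theorem pvRstripCR_cons (a : Char) (t : List Char) :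
    pvRstripCR (a :: t) = (if pvRstripCR t = [] then (if a = '\r' then [] else [a])
                           else a :: pvRstripCR t) := by
  unfold pvRstripCR
  rw [List.reverse_cons, List.dropWhile_append]
  by_cases h : t.reverse.dropWhile (· == '\r') = []
  · by_cases ha : a = '\r' <;> simp [h, ha]
  · have : (t.reverse.dropWhile (· == '\r')).isEmpty = false := by
      simpa [List.isEmpty_iff] using h
    simp [this, h]

-- rstrip('\r') commutes with the leading-whitespace drop
theorem pvRstripCR_nil_iff (t : List Char) : pvRstripCR t = [] ↔ ∀ c ∈ t, c = '\r' := by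
  unfold pvRstripCR
  rw [List.reverse_eq_nil_iff, List.dropWhile_eq_nil_iff]
  constructor
  · intro h c hc
    simpa using h c (by simpa using hc)
  · intro h c hc
    simpa using h c (by simpa using hc)

theorem pvLstrip_rstripCR (x : List Char) :
    PySem.Chars.lstrip (pvRstripCR x) = pvRstripCR (PySem.Chars.lstrip x) := by
  induction x with
  | nil => rfl
  | cons a t ih =>
    rw [pvRstripCR_cons]
    by_cases hsp : PySem.Chars.isspace a = true
    · have hls : PySem.Chars.lstrip (a :: t) = PySem.Chars.lstrip t := by
        simp [PySem.Chars.lstrip, List.dropWhile_cons, hsp]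
      by_cases h : pvRstripCR t = []
      · have hall : ∀ c ∈ t, c = '\r' := (pvRstripCR_nil_iff t).mp h
        have htall : PySem.Chars.lstrip t = [] := by
          apply List.dropWhile_eq_nil_iff.mpr
          intro c hc
          have : c = '\r' := hall c hc
          subst this; decide
        have hrhs : pvRstripCR (PySem.Chars.lstrip (a :: t)) = [] := by
          rw [hls, htall]; rfl
        rw [hrhs, if_pos h]
        by_cases ha : a = '\r'
        · rw [if_pos ha]; rfl
        · rw [if_neg ha]
          simp [PySem.Chars.lstrip, List.dropWhile_cons, hsp]
      · rw [if_neg h, hls, ← ih]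
        simp [PySem.Chars.lstrip, List.dropWhile_cons, hsp]
    · have ha : a ≠ '\r' := by
        intro hh; subst hh; exact hsp (by decide)
      have hls : PySem.Chars.lstrip (a :: t) = a :: t := by
        simp [PySem.Chars.lstrip, List.dropWhile_cons, hsp]
      rw [hls, pvRstripCR_cons]
      by_cases h : pvRstripCR t = []
      · simp [h, ha, PySem.Chars.lstrip, List.dropWhile_cons, hsp]
      · simp [h, PySem.Chars.lstrip, List.dropWhile_cons, hsp]

-- stripping whitespace after rstrip('\r') is the plain whitespace strip
theorem pvStrip_rstripCR (l : List Char) :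
    PySem.Chars.strip (pvRstripCR l) = PySem.Chars.strip l := by
  unfold PySem.Chars.strip
  rw [pvLstrip_rstripCR]
  unfold PySem.Chars.rstrip pvRstripCR
  rw [List.reverse_reverse, pvDropSp_dropCr]

theorem pvStrStrip_rstripCR (p : List Char) :
    PySem.Str.strip (String.ofList (pvRstripCR p)) = String.ofList (PySem.Chars.strip p) := by
  show String.ofList (PySem.Chars.strip (String.ofList (pvRstripCR p)).toList) = _
  rw [String.toList_ofList, pvStrip_rstripCR]

-- same-shape equation for B's scanner
theorem pvScan_eq (cs : List Char) :
    pvScan cs = (match cs.dropWhile (· ≠ '\n') with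
      | [] => []
      | _ :: tail =>
        match tail.dropWhile (· ≠ '\n') with
        | [] => [(String.ofList (PySem.Chars.strip (cs.takeWhile (· ≠ '\n'))),
                  String.ofList (PySem.Chars.strip tail))]
        | _ :: tail2 =>
          (String.ofList (PySem.Chars.strip (cs.takeWhile (· ≠ '\n'))),
           String.ofList (PySem.Chars.strip (tail.takeWhile (· ≠ '\n')))) :: pvScan tail2) := by
  rw [pvScan]
  split
  case _ fst h =>
    have hd : cs.dropWhile (· ≠ '\n') = [] := by
      have := congrArg Prod.snd h; simpa [List.span_eq_takeWhile_dropWhile] using this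
    simp only [ne_eq, decide_not] at hd ⊢
    simp [hd]
  case _ first c tail h =>
    have hd : cs.dropWhile (· ≠ '\n') = c :: tail := by
      have := congrArg Prod.snd h; simpa [List.span_eq_takeWhile_dropWhile] using this
    have hf : cs.takeWhile (· ≠ '\n') = first := by
      have := congrArg Prod.fst h; simpa [List.span_eq_takeWhile_dropWhile] using this
    split
    case _ snd h2 =>
      have hd2 : tail.dropWhile (· ≠ '\n') = [] := by
        have := congrArg Prod.snd h2; simpa [List.span_eq_takeWhile_dropWhile] using this
      simp only [ne_eq, decide_not] at hd hf hd2 ⊢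
      simp [hd, hf, hd2]
    case _ second d tail2 h2 =>
      have hd2 : tail.dropWhile (· ≠ '\n') = d :: tail2 := by
        have := congrArg Prod.snd h2; simpa [List.span_eq_takeWhile_dropWhile] using this
      have hf2 : tail.takeWhile (· ≠ '\n') = second := by
        have := congrArg Prod.fst h2; simpa [List.span_eq_takeWhile_dropWhile] using this
      simp only [ne_eq, decide_not] at hd hf hd2 hf2 ⊢
      simp [hd, hf, hd2, hf2]

-- B's scanner computes A's pairing of the split (rstrip'd) lines
theorem pvScan_eq_pairUp (n : Nat) : ∀ (cs : List Char), cs.length ≤ n →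
    pvScan cs = pvPairUp ((pvSplit cs).map (fun p => String.ofList (pvRstripCR p))) := by
  induction n with
  | zero =>
    intro cs h
    have : cs = [] := List.length_eq_zero_iff.mp (Nat.le_zero.mp h)
    subst this
    rw [pvScan_eq, pvSplit_nil]
    rfl
  | succ n ih =>
    intro cs hlen
    rw [pvScan_eq, pvSplit_eq]
    rcases hd : cs.dropWhile (· ≠ '\n') with _ | ⟨c, tail⟩
    · rfl
    · have hlt : tail.length < cs.length := by
        have := List.length_dropWhile_le (· ≠ '\n') cs
        rw [hd] at this; simpa using this
      dsimp only
      rw [pvSplit_eq tail]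
      rcases hd2 : tail.dropWhile (· ≠ '\n') with _ | ⟨d, tail2⟩
      · have ht : tail.takeWhile (· ≠ '\n') = tail := by
          have := List.takeWhile_append_dropWhile (p := fun x => decide (x ≠ '\n')) (l := tail)
          rw [hd2] at this; simpa using this
        simp only [List.map_cons, List.map_nil]
        show _ = (PySem.Str.strip (String.ofList (pvRstripCR (cs.takeWhile (· ≠ '\n')))),
                  PySem.Str.strip (String.ofList (pvRstripCR tail))) :: pvPairUp []
        rw [pvStrStrip_rstripCR, pvStrStrip_rstripCR]
        rfl
      · have hlt2 : tail2.length < tail.length := by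
          have := List.length_dropWhile_le (· ≠ '\n') tail
          rw [hd2] at this; simpa using this
        simp only [List.map_cons]
        show _ = (PySem.Str.strip (String.ofList (pvRstripCR (cs.takeWhile (· ≠ '\n')))),
                  PySem.Str.strip (String.ofList (pvRstripCR (tail.takeWhile (· ≠ '\n')))))
                 :: pvPairUp ((pvSplit tail2).map (fun p => String.ofList (pvRstripCR p)))
        rw [pvStrStrip_rstripCR, pvStrStrip_rstripCR, ih tail2 (by omega)]

-- a text containing '\n' splits into at least two lines
theorem pvSplit_len (cs : List Char) (h : '\n' ∈ cs) : 2 ≤ (pvSplit cs).length := by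
  rw [pvSplit_eq]
  rcases hd : cs.dropWhile (· ≠ '\n') with _ | ⟨c, tail⟩
  · exfalso
    have := List.dropWhile_eq_nil_iff.mp hd
    simpa using this '\n' h
  · have := pvSplit_ne_nil tail
    cases ht : pvSplit tail with
    | nil => exact absurd ht this
    | cons a t => simp [ht]

-- A's comprehension over range(0, len, 2), rebased onto Nat indices
theorem pvRangePairs (ls : List String) :
    (PySem.List.pyRange 0 (ls.length) 2).map
      (fun index => (PySem.Str.strip (PySem.List.pyGetD ls index ""),
                     PySem.Str.strip (PySem.List.pyGetD ls (index + 1) "")))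
    = (List.range ((ls.length + 1) / 2)).map
        (fun k => (PySem.Str.strip (ls.getD (2 * k) ""), PySem.Str.strip (ls.getD (2 * k + 1) ""))) := by
  rw [PySem.List.pyRange_of_pos 0 (ls.length) (by norm_num)]
  rw [List.map_map]
  have hcount : (if (0 : Int) < ls.length then (((ls.length : Int) - 0 + 2 - 1) / 2).toNat else 0)
      = (ls.length + 1) / 2 := by
    split_ifs with h
    · omega
    · omega
  rw [hcount]
  apply List.map_congr_left
  intro k _
  have h1 : (0 : Int) + 2 * (k : Int) = ((2 * k : Nat) : Int) := by push_cast; ring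
  have h2 : ((2 * k : Nat) : Int) + 1 = ((2 * k + 1 : Nat) : Int) := by push_cast; ring
  simp only [Function.comp_apply, h1, h2, PySem.List.pyGetD_natCast]

-- on an even-length list, A's indexed pairs are the two-at-a-time pairs
theorem pvEvenPairs (m : Nat) : ∀ (ls : List String), ls.length = 2 * m →
    (List.range m).map
        (fun k => (PySem.Str.strip (ls.getD (2 * k) ""), PySem.Str.strip (ls.getD (2 * k + 1) "")))
    = pvPairUp ls := by
  induction m with
  | zero =>
    intro ls h
    match ls, h with
    | [], _ => rfl
  | succ m ih =>
    intro ls h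
    match ls, h with
    | a :: b :: rest, h =>
      have hr : rest.length = 2 * m := by simp at h; omega
      rw [List.range_succ_eq_map, List.map_cons, List.map_map]
      show ((PySem.Str.strip a, PySem.Str.strip b) :: _)
          = (PySem.Str.strip a, PySem.Str.strip b) :: pvPairUp rest
      refine congrArg _ ?_
      rw [← ih rest hr]
      apply List.map_congr_left
      intro k _
      have h1 : 2 * (k + 1) = 2 * k + 1 + 1 := by ring
      simp only [Function.comp_apply, Nat.succ_eq_add_one, h1, List.getD_cons_succ]

-- dropping the unmatched last line of an odd-length list does not change the pairs
theorem pvPairUp_dropLast : ∀ (ls : List String), ls.length % 2 = 1 →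
    pvPairUp ls.dropLast = pvPairUp ls := by
  intro ls
  induction ls using pvPairUp.induct with
  | case1 a b rest ih =>
    intro h
    have hr : rest.length % 2 = 1 := by simp at h; omega
    have hne : rest ≠ [] := by intro hh; rw [hh] at hr; simp at hr
    have hdl : (a :: b :: rest).dropLast = a :: b :: rest.dropLast := by
      cases rest with
      | nil => exact absurd rfl hne
      | cons c t => rfl
    rw [hdl]
    show (PySem.Str.strip a, PySem.Str.strip b) :: pvPairUp rest.dropLast
        = (PySem.Str.strip a, PySem.Str.strip b) :: pvPairUp rest
    exact congrArg _ (ih hr)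
  | case2 t hshape =>
    intro h
    match t, hshape, h with
    | [], _, h => simp at h
    | [a], _, _ => rfl
    | a :: b :: rest, hshape, _ => exact absurd rfl (fun hh => hshape a b rest hh)

-- ===== VERDICT (by name: the statement is the Claim_ definition above) =====
theorem read_pairs_py_spec : Claim_equal_read_pairs_py := by
  intro text _ hpre
  unfold Spec_read_pairs_py read_pairs_py read_pairs_py_alt
  have hpre2 : PySem.Chars.isIn ['\n'] text.toList = true := by simpa using hpre
  have hmem : '\n' ∈ text.toList := by
    rcases (PySem.Chars.isIn_iff_infix _ _).mp hpre2 with ⟨p, sfx, hps⟩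
    rw [← hps]; simp
  have hsplit : ((PySem.Str.split? text "\n").getD []) = (pvSplit text.toList).map String.ofList := by
    show ((Option.map (fun x => List.map String.ofList x)
      (PySem.Chars.split? text.toList ("\n" : String).toList)).getD []) = _
    rw [show ("\n" : String).toList = ['\n'] from rfl]
    rw [PySem.Chars.split?]
    simp [pvSplitOn_eq]
  have hlines : ((PySem.Str.split? text "\n").getD []).map (fun l => String.ofList (pvRstripCR l.toList))
      = (pvSplit text.toList).map (fun p => String.ofList (pvRstripCR p)) := by
    rw [hsplit, List.map_map]
    apply List.map_congr_left
    intro p _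
    simp [Function.comp]
  rw [hlines]
  set lines := (pvSplit text.toList).map (fun p => String.ofList (pvRstripCR p)) with hl
  have hlen2 : 2 ≤ lines.length := by
    rw [hl, List.length_map]
    exact pvSplit_len _ hmem
  have hnotlt : ¬ lines.length < 2 := by omega
  rw [if_neg hnotlt]
  have hcond : ¬ (PySem.Str.isIn "\n" text = false) := by
    rw [hpre]; simp
  rw [if_neg hcond]
  rw [pvScan_eq_pairUp (text.toList.length) text.toList (le_refl _)]
  rw [← hl]
  by_cases hodd : lines.length % 2 = 1
  · have hbeq : (lines.length % 2 == 1) = true := by simp [hodd]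
    simp only [hbeq, if_true, PySem.List.slice_to_neg_one]
    rw [pvRangePairs]
    have hld : lines.dropLast.length = lines.length - 1 := List.length_dropLast
    have hdl : lines.dropLast.length = 2 * ((lines.dropLast.length + 1) / 2) := by omega
    rw [pvEvenPairs _ _ hdl, pvPairUp_dropLast _ hodd]
  · have hbeq : (lines.length % 2 == 1) = false := by simp [hodd]
    simp only [hbeq, Bool.false_eq_true, if_false]
    rw [pvRangePairs]
    have hev : lines.length = 2 * ((lines.length + 1) / 2) := by omega
    rw [pvEvenPairs _ _ hev]
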